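-- pv_equiv track=rewrite | github.com/2Ju0/Algorithm | inflearn/2. 탐색/곳감.py | sumArea
-- ===== SOURCE A (Python) =====
-- def sumArea(board):
--     res = 0
--     length = len(board)
--     mid = length // 2
--
--     for i in range(length):
--         row = board[i]
--         if i <= mid:
--             res += sum(row[i:length - i])
--         else:
--             res += sum(row[length - i - 1:i + 1])
--
--     return res
-- ===== SOURCE B (Python) =====
-- def sumArea(board):
--     n = len(board)
--     mid = n // 2
--     total = sum(map(sum, board))
--     for i, row in enumerate(board):
--         lo, stop = (i, n - i) if i <= mid else (n - i - 1, i + 1)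
--         total -= sum(row[:lo]) + sum(row[stop:])
--     return total
-- ===== Notes on version B (the rewrite author's own statement) =====
-- stated objective: alternative
-- what changed: B uses inclusion-exclusion: it first sums the entire board in one pass (sum(map(sum, board))) and then subtracts, row by row, the two outside triangles (the prefix row[:lo] and the suffix row[stop:]), instead of A's direct summation of the inside slice of each row.
import Mathlib
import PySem

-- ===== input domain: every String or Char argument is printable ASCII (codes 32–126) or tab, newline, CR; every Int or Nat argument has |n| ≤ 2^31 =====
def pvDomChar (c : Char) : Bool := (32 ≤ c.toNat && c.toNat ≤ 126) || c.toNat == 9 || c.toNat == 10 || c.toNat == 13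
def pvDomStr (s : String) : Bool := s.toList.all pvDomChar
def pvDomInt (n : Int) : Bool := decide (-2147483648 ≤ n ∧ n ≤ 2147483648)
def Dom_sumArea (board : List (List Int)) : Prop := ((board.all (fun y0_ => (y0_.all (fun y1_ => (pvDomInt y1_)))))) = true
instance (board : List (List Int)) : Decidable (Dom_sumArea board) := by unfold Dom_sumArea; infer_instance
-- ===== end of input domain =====

-- B computes the answer by inclusion-exclusion: it sums the whole board once and then
-- subtracts the two outside triangles (prefix and suffix of each row); objective: alternative.

-- ===== PORT A =====
def sumArea (board : List (List Int)) : Int :=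
  let length : Int := board.length
  let mid : Int := PySem.Int.floordiv length 2
  (PySem.List.pyRange 0 length 1).foldl (fun res i =>
    let row := PySem.List.pyGetD board i []   -- board[i]; i is always in range here
    if i ≤ mid then
      res + (PySem.List.slice row (some i) (some (length - i))).sum
    else
      res + (PySem.List.slice row (some (length - i - 1)) (some (i + 1))).sum) 0

-- ===== PORT B =====
def sumArea_alt (board : List (List Int)) : Int :=
  let n : Int := board.length
  let mid : Int := PySem.Int.floordiv n 2
  let total0 : Int := (board.map List.sum).sum      -- sum(map(sum, board))
  (board.foldl (fun (acc : Int × Int) row =>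
      let i := acc.2
      let ls := if i ≤ mid then (i, n - i) else (n - i - 1, i + 1)
      (acc.1 - ((PySem.List.slice row none (some ls.1)).sum
                + (PySem.List.slice row (some ls.2) none).sum), i + 1)) (total0, 0)).1

-- ===== PRECONDITION & SPEC =====
def Spec_sumArea (board : List (List Int)) (out : Int) : Prop := out = sumArea_alt board
instance (board : List (List Int)) (out : Int) : Decidable (Spec_sumArea board out) := by unfold Spec_sumArea; infer_instance

-- ===== CLAIM (what is proved, stated in full; the proofs are below) =====
def Claim_equal_sumArea : Prop := ∀ (board : List (List Int)), Dom_sumArea board → Spec_sumArea board (sumArea board)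

-- ===== LEMMAS AND PROOFS =====

-- the common index-carrying description of both programs (A's per-row inside-slice sums)
def G (n mid : Int) : Int → List (List Int) → Int
  | _, [] => 0
  | i, row :: rest =>
      (if i ≤ mid then (PySem.List.slice row (some i) (some (n - i))).sum
       else (PySem.List.slice row (some (n - i - 1)) (some (i + 1))).sum)
      + G n mid (i + 1) rest

theorem foldlA_eq_G (n mid : Int) (board : List (List Int)) :
    ∀ (xs pre : List (List Int)) (a : Int), board = pre ++ xs → a = (pre.length : Int) →
      ∀ (res : Int),
      (PySem.List.pyRange a (board.length : Int) 1).foldl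
        (fun res i =>
          if i ≤ mid then
            res + (PySem.List.slice (PySem.List.pyGetD board i []) (some i) (some (n - i))).sum
          else
            res + (PySem.List.slice (PySem.List.pyGetD board i [])
                    (some (n - i - 1)) (some (i + 1))).sum) res
      = res + G n mid a xs := by
  intro xs
  induction xs with
  | nil =>
    intro pre a hb ha res
    have hlen : a = (board.length : Int) := by subst hb ha; simp
    rw [hlen, PySem.List.pyRange_one_eq_nil le_rfl]
    simp [G]
  | cons row rest ih =>
    intro pre a hb ha res
    have hlt : a < (board.length : Int) := by subst hb ha; simp
    rw [PySem.List.pyRange_one_cons hlt]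
    simp only [List.foldl_cons]
    have hget : PySem.List.pyGetD board a [] = row := by
      subst hb ha
      rw [PySem.List.pyGetD_natCast]
      simp [List.getD]
    have hpre' : board = (pre ++ [row]) ++ rest := by subst hb; simp
    have ha' : a + 1 = (((pre ++ [row]).length : Nat) : Int) := by subst ha; simp
    rw [ih (pre ++ [row]) (a + 1) hpre' ha' _]
    simp only [G, hget]
    split_ifs <;> ring

-- complement identity on Nat indices: sum of the middle block = total − prefix − suffix
theorem sum_middle (l : List Int) (a b : Nat) (hab : a ≤ b) :
    ((l.drop a).take (b - a)).sum = l.sum - (l.take a).sum - (l.drop b).sum := by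
  have h1 : l.sum = (l.take a).sum + (l.drop a).sum := by
    rw [← List.sum_append, List.take_append_drop]
  have h2 : (l.drop a).sum = ((l.drop a).take (b - a)).sum + ((l.drop a).drop (b - a)).sum := by
    rw [← List.sum_append, List.take_append_drop]
  have h3 : (l.drop a).drop (b - a) = l.drop b := by
    rw [List.drop_drop]; congr 1; omega
  rw [h3] at h2
  linarith

-- complement identity on Int slice bounds, 0 ≤ lo ≤ stop
theorem slice_sum_complement (row : List Int) (lo stop : Int)
    (h0 : 0 ≤ lo) (hls : lo ≤ stop) :
    (PySem.List.slice row (some lo) (some stop)).sum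
      = row.sum - (PySem.List.slice row none (some lo)).sum
              - (PySem.List.slice row (some stop) none).sum := by
  rw [PySem.List.slice_toNat row h0 (by omega),
      PySem.List.slice_to row h0, PySem.List.slice_from row (by omega : (0:Int) ≤ stop)]
  exact sum_middle row lo.toNat stop.toNat (by omega)

theorem foldlB_eq_G (n mid : Int) (hm1 : 2 * mid ≤ n) (hm2 : n ≤ 2 * mid + 2) :
    ∀ (xs : List (List Int)) (t i0 : Int), 0 ≤ i0 → i0 + xs.length ≤ n →
      (xs.foldl (fun (acc : Int × Int) row =>
          let i := acc.2
          let ls := if i ≤ mid then (i, n - i) else (n - i - 1, i + 1)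
          (acc.1 - ((PySem.List.slice row none (some ls.1)).sum
                    + (PySem.List.slice row (some ls.2) none).sum), i + 1)) (t, i0)).1
      = t - (xs.map List.sum).sum + G n mid i0 xs := by
  intro xs
  induction xs with
  | nil => intro t i0 _ _; simp [G]
  | cons row rest ih =>
    intro t i0 h0 hn
    have hn' : i0 + 1 ≤ n := by simp at hn; omega
    have hrest : (i0 + 1) + (rest.length : Int) ≤ n := by simp at hn ⊢; omega
    simp only [List.foldl_cons, G]
    by_cases hc : i0 ≤ mid
    · rw [if_pos hc, if_pos hc]
      rw [ih _ _ (by omega) hrest]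
      rw [slice_sum_complement row i0 (n - i0) h0 (by omega)]
      simp only [List.map_cons, List.sum_cons]
      ring
    · rw [if_neg hc, if_neg hc]
      rw [ih _ _ (by omega) hrest]
      have hlo : 0 ≤ n - i0 - 1 := by omega
      rw [show n - i0 - 1 = n - 1 - i0 by ring] at hlo ⊢
      rw [slice_sum_complement row (n - 1 - i0) (i0 + 1) hlo (by omega)]
      rw [show some (n - 1 - i0) = some (n - i0 - 1) by ring_nf]
      simp only [List.map_cons, List.sum_cons]
      ring

-- ===== VERDICT (by name: the statement is the Claim_ definition above) =====
theorem sumArea_spec : Claim_equal_sumArea := by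
  intro board _
  unfold Spec_sumArea sumArea sumArea_alt
  simp only []
  have hmid : PySem.Int.floordiv (board.length : Int) 2 = (board.length : Int) / 2 :=
    PySem.Int.floordiv_eq_ediv_of_pos (by omega)
  rw [foldlA_eq_G (board.length : Int) (PySem.Int.floordiv (board.length : Int) 2) board
        board [] 0 (by simp) (by simp) 0]
  rw [foldlB_eq_G (board.length : Int) (PySem.Int.floordiv (board.length : Int) 2)
        (by rw [hmid]; omega) (by rw [hmid]; omega) board _ 0 le_rfl (by simp)]
  ring
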